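-- pv_equiv track=rewrite | github.com/ajoshpratt/westpa | src/west/errors.py | does_not_exist_in_list
-- ===== SOURCE A (Python) =====
-- def does_not_exist_in_list(l1, l2):
--     # We want to see if any string in l1 is a part of string
--     # in l2.
--     # We'll return all values that are in the second list.
--     rl = []
--     for s1 in l1:
--         exists = False
--         for s2 in l2:
--             if s1 in s2:
--                 exists = True
--         if exists == False:
--             rl.append(s1)
--     return rl
-- ===== SOURCE B (Python) =====
-- def does_not_exist_in_list(l1, l2):
--     # Different algorithm: no substring search at all.  For each distinct
--     # pattern length, slide a window of that length over every text of l2 and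
--     # record every window in a hash set (a substring index); a pattern then
--     # occurs in some text iff it is a key of the index.
--     lens = {len(s1) for s1 in l1}
--     index = set()
--     for s2 in l2:
--         n = len(s2)
--         for L in lens:
--             if L <= n:
--                 for i in range(n - L + 1):
--                     index.add(s2[i:i + L])
--     return [s1 for s1 in l1 if s1 not in index]
-- ===== Notes on version B (the rewrite author's own statement) =====
-- stated objective: faster
-- what changed: A runs a full substring scan of every l2 text for every l1 pattern; B never calls substring search: it builds a sliding-window substring index once (a set of all windows of each distinct pattern length over each text) and decides each pattern by one set lookup.
import Mathlib
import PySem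

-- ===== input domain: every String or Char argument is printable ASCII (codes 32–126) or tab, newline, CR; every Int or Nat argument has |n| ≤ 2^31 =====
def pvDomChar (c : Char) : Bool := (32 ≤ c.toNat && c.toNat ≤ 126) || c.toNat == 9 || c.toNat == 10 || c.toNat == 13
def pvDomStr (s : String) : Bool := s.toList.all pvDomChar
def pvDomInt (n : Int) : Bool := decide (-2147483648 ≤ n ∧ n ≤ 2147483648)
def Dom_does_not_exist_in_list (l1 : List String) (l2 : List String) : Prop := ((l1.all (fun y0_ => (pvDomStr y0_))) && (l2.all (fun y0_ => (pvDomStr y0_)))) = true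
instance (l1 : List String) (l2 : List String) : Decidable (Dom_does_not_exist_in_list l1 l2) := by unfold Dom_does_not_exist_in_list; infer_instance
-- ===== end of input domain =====

-- B replaces A's per-pattern substring scans by a sliding-window substring index built once over l2.

-- ===== PORT A =====
def does_not_exist_in_list (l1 : List String) (l2 : List String) : List String :=
  l1.foldl (fun rl s1 =>
    let ex := l2.foldl (fun ex s2 => if PySem.Str.isIn s1 s2 then true else ex) false
    if ex = false then rl ++ [s1] else rl) []

-- ===== PORT B =====
-- windows of length L over a text (Python's inner `for i in range(n - L + 1): index.add(s2[i:i+L])`;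
-- the slice s2[i:i+L] with 0 ≤ i, i+L ≤ n is exactly (take L ∘ drop i))
def bAddWindows (s2 : List Char) (L : Nat) (idx : PySem.Set (List Char)) : PySem.Set (List Char) :=
  (List.range (s2.length - L + 1)).foldl (fun idx i => PySem.Set.add idx ((s2.drop i).take L)) idx

def does_not_exist_in_list_alt (l1 : List String) (l2 : List String) : List String :=
  let lens : PySem.Set Nat := PySem.Set.ofList (l1.map (fun s => s.toList.length))
  let index : PySem.Set (List Char) := l2.foldl (fun idx s2 =>
    lens.foldl (fun idx L =>
      if L ≤ s2.toList.length then bAddWindows s2.toList L idx else idx) idx) PySem.Set.empty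
  l1.filter (fun s1 => !(PySem.Set.contains index s1.toList))

-- ===== PRECONDITION & SPEC =====
def Spec_does_not_exist_in_list (l1 : List String) (l2 : List String) (out : List String) : Prop := out = does_not_exist_in_list_alt l1 l2
instance (l1 : List String) (l2 : List String) (out : List String) : Decidable (Spec_does_not_exist_in_list l1 l2 out) := by unfold Spec_does_not_exist_in_list; infer_instance

-- ===== CLAIM (what is proved, stated in full; the proofs are below) =====
def Claim_equal_does_not_exist_in_list : Prop := ∀ (l1 : List String) (l2 : List String), Dom_does_not_exist_in_list l1 l2 → Spec_does_not_exist_in_list l1 l2 (does_not_exist_in_list l1 l2)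

-- ===== LEMMAS AND PROOFS =====

-- A's inner loop computes "s1 occurs in some string of l2".
theorem innerA_eq_any (s1 : String) (l2 : List String) (e : Bool) :
    l2.foldl (fun ex s2 => if PySem.Str.isIn s1 s2 then true else ex) e
      = (e || l2.any (fun s2 => PySem.Str.isIn s1 s2)) := by
  induction l2 generalizing e with
  | nil => simp
  | cons h t ih =>
    simp only [List.foldl_cons, List.any_cons, ih]
    cases hb : PySem.Str.isIn s1 h <;> cases e <;> simp

-- A's outer loop (with the inner loop replaced by `any`) is a filter.
theorem outerA_eq_filter (l1 l2 : List String) (acc : List String) :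
    l1.foldl (fun rl s1 =>
      if (l2.any fun s2 => PySem.Str.isIn s1 s2) = false then rl ++ [s1] else rl) acc
      = acc ++ l1.filter (fun s1 => !(l2.any (fun s2 => PySem.Str.isIn s1 s2))) := by
  induction l1 generalizing acc with
  | nil => simp
  | cons h t ih =>
    simp only [List.foldl_cons, List.filter_cons]
    by_cases hc : (l2.any fun s2 => PySem.Str.isIn h s2) = true
    · rw [hc, if_neg (by simp), if_neg (by simp), ih]
    · rw [Bool.not_eq_true] at hc
      rw [hc, if_pos rfl, if_pos (by simp), ih]
      simp

theorem mem_bAddWindows (s2 : List Char) (L : Nat) (acc : PySem.Set (List Char)) (x : List Char) :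
    (x ∈ bAddWindows s2 L acc) ↔ (x ∈ acc ∨ ∃ i < s2.length - L + 1, x = (s2.drop i).take L) := by
  unfold bAddWindows
  rw [PySem.Set.mem_foldl_add (List.range (s2.length - L + 1)) (fun i => (s2.drop i).take L) acc x]
  simp only [List.mem_range]

-- windows of length x.length are exactly the infix occurrences of x
theorem window_iff_infix (s2 x : List Char) :
    (x.length ≤ s2.length ∧ ∃ i < s2.length - x.length + 1, (s2.drop i).take x.length = x)
      ↔ x <:+: s2 := by
  constructor
  · rintro ⟨hL, i, hi, hw⟩
    have hpre : x <+: s2.drop i := hw ▸ List.take_prefix _ _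
    exact hpre.isInfix.trans (List.drop_suffix i s2).isInfix
  · intro hinf
    obtain ⟨t, hp, hs⟩ := List.infix_iff_prefix_suffix.mp hinf
    obtain ⟨u, rfl⟩ := hs
    have hpre : x <+: (u ++ t).drop u.length := by simpa [List.drop_left] using hp
    set j := u.length with hj
    have hjle : j ≤ (u ++ t).length := by simp [hj]
    have hlen : x.length ≤ ((u ++ t).drop j).length := hpre.length_le
    rw [List.length_drop] at hlen
    have htake : ((u ++ t).drop j).take x.length = x := (List.prefix_iff_eq_take.mp hpre).symm
    exact ⟨by omega, j, by omega, htake⟩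

-- membership in B's inner fold over the length set
theorem mem_idx_lens (lens : List Nat) (s2 : List Char) (acc : PySem.Set (List Char)) (x : List Char) :
    (x ∈ lens.foldl (fun idx L => if L ≤ s2.length then bAddWindows s2 L idx else idx) acc)
      ↔ (x ∈ acc ∨ ∃ L ∈ lens, L ≤ s2.length ∧ ∃ i < s2.length - L + 1, x = (s2.drop i).take L) := by
  induction lens generalizing acc with
  | nil => simp
  | cons h t ih =>
    simp only [List.foldl_cons, List.mem_cons]
    by_cases hh : h ≤ s2.length
    · rw [if_pos hh, ih]
      simp only [mem_bAddWindows]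
      constructor
      · rintro ((h1 | h1) | ⟨L, h2, h3⟩)
        · exact Or.inl h1
        · exact Or.inr ⟨h, Or.inl rfl, hh, h1⟩
        · exact Or.inr ⟨L, Or.inr h2, h3⟩
      · rintro (h1 | ⟨L, rfl | h2, h3⟩)
        · exact Or.inl (Or.inl h1)
        · exact Or.inl (Or.inr h3.2)
        · exact Or.inr ⟨L, h2, h3⟩
    · rw [if_neg hh, ih]
      constructor
      · rintro (h1 | ⟨L, h2, h3⟩)
        · exact Or.inl h1
        · exact Or.inr ⟨L, Or.inr h2, h3⟩
      · rintro (h1 | ⟨L, rfl | h2, h3⟩)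
        · exact Or.inl h1
        · exact absurd h3.1 hh
        · exact Or.inr ⟨L, h2, h3⟩

-- membership in B's outer fold over l2
theorem mem_idx (lens : List Nat) (l2 : List String) (acc : PySem.Set (List Char)) (x : List Char) :
    (x ∈ l2.foldl (fun idx s2 => lens.foldl
        (fun idx L => if L ≤ s2.toList.length then bAddWindows s2.toList L idx else idx) idx) acc)
      ↔ (x ∈ acc ∨ ∃ s2 ∈ l2, ∃ L ∈ lens, L ≤ s2.toList.length ∧
           ∃ i < s2.toList.length - L + 1, x = (s2.toList.drop i).take L) := by
  induction l2 generalizing acc with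
  | nil => simp
  | cons h t ih =>
    simp only [List.foldl_cons, ih, mem_idx_lens, List.mem_cons]
    constructor
    · rintro ((h1 | h1) | ⟨s2, h2, h3⟩)
      · exact Or.inl h1
      · exact Or.inr ⟨h, Or.inl rfl, h1⟩
      · exact Or.inr ⟨s2, Or.inr h2, h3⟩
    · rintro (h1 | ⟨s2, rfl | h2, h3⟩)
      · exact Or.inl (Or.inl h1)
      · exact Or.inl (Or.inr h3)
      · exact Or.inr ⟨s2, h2, h3⟩

-- a window added for bucket L has length L, so only the bucket L = x.length can produce x
theorem window_length (s2 : List Char) (L i : Nat) (hL : L ≤ s2.length)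
    (hi : i < s2.length - L + 1) : ((s2.drop i).take L).length = L := by
  simp only [List.length_take, List.length_drop]
  omega

-- ===== VERDICT (by name: the statement is the Claim_ definition above) =====
theorem does_not_exist_in_list_spec : Claim_equal_does_not_exist_in_list := by
  intro l1 l2 _
  unfold Spec_does_not_exist_in_list does_not_exist_in_list does_not_exist_in_list_alt
  simp only [innerA_eq_any, Bool.false_or]
  rw [outerA_eq_filter, List.nil_append]
  refine List.filter_congr ?_
  intro s1 hx
  congr 1
  rw [Bool.eq_iff_iff, List.any_eq_true, PySem.Set.contains_iff, mem_idx]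
  constructor
  · rintro ⟨s2, h4, h5⟩
    rw [PySem.Str.isIn_iff_infix] at h5
    obtain ⟨hL, i, hi, hw⟩ := (window_iff_infix s2.toList s1.toList).mpr h5
    refine Or.inr ⟨s2, h4, s1.toList.length, ?_, hL, i, hi, hw.symm⟩
    exact (PySem.Set.mem_ofList _ _).mpr (List.mem_map.mpr ⟨s1, hx, rfl⟩)
  · rintro (h1 | ⟨s2, h2, L, _, hL, i, hi, hw⟩)
    · simp [PySem.Set.empty] at h1
    · have hlen : L = s1.toList.length := by
        rw [hw]; exact (window_length s2.toList L i hL hi).symm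
      subst hlen
      refine ⟨s2, h2, ?_⟩
      rw [PySem.Str.isIn_iff_infix]
      exact (window_iff_infix s2.toList s1.toList).mp ⟨hL, i, hi, hw.symm⟩
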